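-- pv_equiv track=rewrite | github.com/MrBrantCode/unitest_baseline | mut_generate/mist_train_taco/taco_9729/solution.py | count_max_sum_pairs
-- ===== SOURCE A (Python) =====
-- from collections import defaultdict
--
-- def count_max_sum_pairs(arr, n):
--     if n == 1:
--         return 0
--
--     store = defaultdict(int)
--     for item in arr:
--         store[item] += 1
--
--     maxi = max(store.keys())
--     if store[maxi] > 1:
--         return store[maxi] * (store[maxi] - 1) // 2
--
--     del store[maxi]
--     return store[max(store.keys())]
-- ===== SOURCE B (Python) =====
-- def _run_len(s, v):
--     k = 0
--     for x in s:
--         if x != v: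
--             break
--         k += 1
--     return k
--
-- def count_max_sum_pairs(arr, n):
--     if n == 1:
--         return 0
--     s = sorted(arr, reverse=True)
--     cnt = _run_len(s, s[0])
--     if cnt > 1:
--         return cnt * (cnt - 1) // 2
--     rest = s[1:]
--     return _run_len(rest, rest[0])
-- ===== Notes on version B (the rewrite author's own statement) =====
-- stated objective: alternative
-- what changed: Replaces the defaultdict frequency table and two key-max scans with sort-descending plus leading-run-length scans (run of the head, else run of the second element).
import Mathlib
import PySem

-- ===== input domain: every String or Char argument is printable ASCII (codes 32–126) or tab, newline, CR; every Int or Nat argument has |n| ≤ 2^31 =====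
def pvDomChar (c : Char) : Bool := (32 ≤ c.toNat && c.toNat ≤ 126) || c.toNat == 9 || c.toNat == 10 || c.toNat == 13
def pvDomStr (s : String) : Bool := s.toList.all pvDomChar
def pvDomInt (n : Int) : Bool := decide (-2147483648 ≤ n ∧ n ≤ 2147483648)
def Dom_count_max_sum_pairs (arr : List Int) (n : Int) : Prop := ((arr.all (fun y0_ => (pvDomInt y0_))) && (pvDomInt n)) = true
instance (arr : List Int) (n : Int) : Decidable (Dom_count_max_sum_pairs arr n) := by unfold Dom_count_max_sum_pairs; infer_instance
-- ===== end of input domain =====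

-- B replaces A's defaultdict counting + two max-over-keys scans by sort-descending + run-length scans (alternative decomposition, not claimed faster).

-- ===== PORT A =====
def count_max_sum_pairs (arr : List Int) (n : Int) : Int :=
  if n = 1 then 0
  else
    -- store = defaultdict(int); for item in arr: store[item] += 1
    let store := arr.foldl (fun d item => d.modify item 0 (· + 1)) PySem.Dict.empty
    -- maxi = max(store.keys())  (ValueError when empty → none branch, outside Pre_)
    match PySem.List.max? store.keys (fun k => k) with
    | none => 0
    | some maxi =>
      if store.getD maxi 0 > 1 then
        PySem.Int.floordiv (store.getD maxi 0 * (store.getD maxi 0 - 1)) 2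
      else
        -- del store[maxi]; return store[max(store.keys())]
        let store2 := store.erase maxi
        match PySem.List.max? store2.keys (fun k => k) with
        | none => 0
        | some m2 => store2.getD m2 0

-- ===== PORT B =====
-- _run_len(s, v): count of leading elements of s equal to v
def pvRunLen : List Int → Int → Int
  | [], _ => 0
  | x :: xs, v => if x = v then 1 + pvRunLen xs v else 0

def count_max_sum_pairs_alt (arr : List Int) (n : Int) : Int :=
  if n = 1 then 0
  else
    let s := PySem.List.sorted arr (fun x => x) true
    -- s[0]  (IndexError when empty → none branch, outside Pre_)
    match PySem.List.pyGet? s 0 with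
    | none => 0
    | some mx =>
      let cnt := pvRunLen s mx
      if cnt > 1 then PySem.Int.floordiv (cnt * (cnt - 1)) 2
      else
        let rest := PySem.List.slice s (some 1) none
        match PySem.List.pyGet? rest 0 with
        | none => 0
        | some sec => pvRunLen rest sec

-- ===== PRECONDITION & SPEC =====
-- Pre_ excludes exactly the inputs where A raises ValueError (max() of an empty sequence):
-- n ≠ 1 with fewer than two elements (empty arr, or a single element whose key is deleted).
def Pre_count_max_sum_pairs (arr : List Int) (n : Int) : Prop := n = 1 ∨ 2 ≤ arr.length
instance (arr : List Int) (n : Int) : Decidable (Pre_count_max_sum_pairs arr n) := by unfold Pre_count_max_sum_pairs; infer_instance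
def pvWitness_count_max_sum_pairs : List Int × Int := ([3, 1, 3], 3)

def Spec_count_max_sum_pairs (arr : List Int) (n : Int) (out : Int) : Prop := out = count_max_sum_pairs_alt arr n
instance (arr : List Int) (n : Int) (out : Int) : Decidable (Spec_count_max_sum_pairs arr n out) := by unfold Spec_count_max_sum_pairs; infer_instance

-- ===== CLAIM (what is proved, stated in full; the proofs are below) =====
def Claim_equal_count_max_sum_pairs : Prop := ∀ (arr : List Int) (n : Int), Dom_count_max_sum_pairs arr n → Pre_count_max_sum_pairs arr n → Spec_count_max_sum_pairs arr n (count_max_sum_pairs arr n)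

-- ===== LEMMAS AND PROOFS =====

theorem pvKeysErase (d : PySem.Dict Int Int) (k : Int) :
    (d.erase k).keys = d.keys.filter (fun x => !(x == k)) := by
  cases d with | mk items =>
  simp only [PySem.Dict.erase, PySem.Dict.keys, List.filter_map]
  rfl

theorem pvGetErase (items : List (Int × Int)) (k k' : Int) (h : k' ≠ k) :
    (PySem.Dict.erase (PySem.Dict.mk items) k).get? k' = (PySem.Dict.mk items).get? k' := by
  induction items with
  | nil => rfl
  | cons p rest ih =>
    simp only [PySem.Dict.erase, PySem.Dict.get?, List.filter_cons] at *
    by_cases hk : p.1 = k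
    · rw [if_neg (by simp [hk]), List.find?_cons_of_neg (by simp [hk, Ne.symm h])]
      exact ih
    · rw [if_pos (by simp [hk])]
      by_cases hk' : p.1 = k'
      · rw [List.find?_cons_of_pos (by simp [hk']), List.find?_cons_of_pos (by simp [hk'])]
      · rw [List.find?_cons_of_neg (by simp [hk']), List.find?_cons_of_neg (by simp [hk'])]
        exact ih

theorem pvGetDErase (d : PySem.Dict Int Int) (k k' : Int) (h : k' ≠ k) (d0 : Int) :
    (d.erase k).getD k' d0 = d.getD k' d0 := by
  cases d with | mk items =>
  simp only [PySem.Dict.getD_eq_get?_getD, pvGetErase items k k' h]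

theorem pvRunLen_eq_count (s : List Int) (v : Int)
    (hp : s.Pairwise (fun a b => b ≤ a)) (hub : ∀ x ∈ s, x ≤ v) :
    pvRunLen s v = (s.count v : Int) := by
  induction s with
  | nil => simp [pvRunLen]
  | cons x xs ih =>
    rcases List.pairwise_cons.mp hp with ⟨hhead, htail⟩
    by_cases hx : x = v
    · have : pvRunLen xs v = (xs.count v : Int) := by
        exact ih htail (fun y hy => le_trans (hhead y hy) (hx ▸ le_refl x))
      simp [pvRunLen, hx, this]
      ring
    · have hxlt : x < v := lt_of_le_of_ne (hub x (by simp)) hx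
      have hz : (x :: xs).count v = 0 := by
        rw [List.count_eq_zero]
        simp only [List.mem_cons, not_or]
        exact ⟨fun h => lt_irrefl x (h ▸ hxlt), fun h => absurd (hhead v h) (not_le.mpr hxlt)⟩
      simp [pvRunLen, hx, hz]

-- ===== VERDICT (by name: the statement is the Claim_ definition above) =====
theorem count_max_sum_pairs_spec : Claim_equal_count_max_sum_pairs := by
  intro arr n _ hpre
  unfold Spec_count_max_sum_pairs count_max_sum_pairs count_max_sum_pairs_alt
  by_cases hn : n = 1
  · simp [hn]
  · have hlen : 2 ≤ arr.length := hpre.resolve_left hn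
    simp only [if_neg hn]
    have harrne : arr ≠ [] := by
      cases arr with
      | nil => simp at hlen
      | cons a t => simp
    -- the sorted list
    have hslen : (PySem.List.sorted arr (fun x => x) true).length = arr.length :=
      PySem.List.length_sorted arr (fun x => x) true
    cases hs0 : PySem.List.sorted arr (fun x => x) true with
    | nil => exfalso; rw [hs0] at hslen; simp at hslen; omega
    | cons mx rest =>
    cases hr0 : rest with
    | nil => exfalso; rw [hs0, hr0] at hslen; simp at hslen; omega
    | cons sec rest2 =>
    subst hr0
    have hperm : (mx :: sec :: rest2).Perm arr := hs0 ▸ PySem.List.sorted_perm arr (fun x => x) true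
    have hpair : (mx :: sec :: rest2).Pairwise (fun a b => b ≤ a) := by
      have := PySem.List.sorted_pairwise_rev arr (fun x => x)
      rw [hs0] at this
      simpa using this
    have hmxub : ∀ y ∈ arr, y ≤ mx := by
      have := PySem.List.key_head_sorted_rev_ge (xs := arr) (key := fun x => x) hs0
      simpa using this
    have hmxmem : mx ∈ arr := hperm.mem_iff.mp (by simp)
    have hsecmem : sec ∈ arr := hperm.mem_iff.mp (by simp)
    -- A's store is Counter(arr)
    rw [show arr.foldl (fun d item => d.modify item 0 (· + 1)) PySem.Dict.empty
          = PySem.Dict.counter arr from (PySem.Dict.counter_eq_foldl arr).symm]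
    rw [PySem.Dict.keys_counter]
    cases hmax : PySem.List.max? (PySem.Set.ofList arr) (fun k => k) with
    | none =>
      exfalso
      have := (PySem.List.max?_eq_none_iff (xs := PySem.Set.ofList arr) (key := fun k => k)).mp hmax
      rw [List.eq_nil_iff_forall_not_mem] at this
      exact this mx (by simp [PySem.Set.mem_ofList, hmxmem])
    | some maxi =>
    have hmaximem : maxi ∈ arr := by
      have h := PySem.List.max?_mem hmax
      rwa [PySem.Set.mem_ofList] at h
    have hmaxiub : ∀ y ∈ arr, y ≤ maxi := by
      have := PySem.List.max?_isMax hmax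
      exact fun y hy => by simpa using this y (by simp [PySem.Set.mem_ofList, hy])
    have heq : maxi = mx := le_antisymm (hmxub maxi hmaximem) (hmaxiub mx hmxmem)
    rw [heq]
    have hub_s : ∀ x ∈ (mx :: sec :: rest2), x ≤ mx := fun x hx => hmxub x (hperm.mem_iff.mp hx)
    have hrun : pvRunLen (mx :: sec :: rest2) mx = ((mx :: sec :: rest2).count mx : Int) :=
      pvRunLen_eq_count _ _ hpair hub_s
    have hcnt : (mx :: sec :: rest2).count mx = arr.count mx := hperm.count_eq mx
    simp only [PySem.List.pyGet?_zero_cons, PySem.Dict.getD_counter]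
    rw [hrun, hcnt]
    by_cases hgt : ((arr.count mx : Int) > 1)
    · simp only [if_pos hgt]
    · simp only [if_neg hgt]
      have hpos : 0 < arr.count mx := List.count_pos_iff.mpr hmxmem
      have hone : arr.count mx = 1 := by omega
      have hz : (sec :: rest2).count mx = 0 := by
        have h1 := hcnt
        rw [hone, List.count_cons_self] at h1
        omega
      have hmxnotin : mx ∉ (sec :: rest2) := List.count_eq_zero.mp hz
      have hsecne : sec ≠ mx := fun h => hmxnotin (by simp [h])
      have hpair2 : (sec :: rest2).Pairwise (fun a b => b ≤ a) := (List.pairwise_cons.mp hpair).2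
      have hub2 : ∀ x ∈ (sec :: rest2), x ≤ sec := by
        intro x hx
        rcases List.mem_cons.mp hx with h | h
        · exact h ▸ le_refl _
        · exact (List.pairwise_cons.mp hpair2).1 x h
      have hrun2 : pvRunLen (sec :: rest2) sec = ((sec :: rest2).count sec : Int) :=
        pvRunLen_eq_count _ _ hpair2 hub2
      rw [PySem.List.slice_from_one]
      simp only [List.tail_cons, PySem.List.pyGet?_zero_cons]
      rw [pvKeysErase, PySem.Dict.keys_counter]
      have hsecin2 : sec ∈ (PySem.Set.ofList arr).filter (fun x => !(x == mx)) :=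
        List.mem_filter.mpr ⟨by simp [PySem.Set.mem_ofList, hsecmem], by simp [hsecne]⟩
      cases hmax2 : PySem.List.max? ((PySem.Set.ofList arr).filter (fun x => !(x == mx))) (fun k => k) with
      | none =>
        exfalso
        have := (PySem.List.max?_eq_none_iff
          (xs := (PySem.Set.ofList arr).filter (fun x => !(x == mx))) (key := fun k => k)).mp hmax2
        rw [List.eq_nil_iff_forall_not_mem] at this
        exact this sec hsecin2
      | some m2 =>
      have hm2f : m2 ∈ (PySem.Set.ofList arr).filter (fun x => !(x == mx)) := PySem.List.max?_mem hmax2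
      have hm2arr : m2 ∈ arr := by
        have := (List.mem_filter.mp hm2f).1
        rwa [PySem.Set.mem_ofList] at this
      have hm2ne : m2 ≠ mx := by
        have := (List.mem_filter.mp hm2f).2
        simpa using this
      have hm2rest : m2 ∈ (sec :: rest2) := by
        have h1 : m2 ∈ mx :: sec :: rest2 := hperm.mem_iff.mpr hm2arr
        rcases List.mem_cons.mp h1 with h | h
        · exact absurd h hm2ne
        · exact h
      have heq2 : m2 = sec :=
        le_antisymm (hub2 m2 hm2rest) (by simpa using PySem.List.max?_isMax hmax2 sec hsecin2)
      subst heq2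
      show ((PySem.Dict.counter arr).erase mx).getD m2 0 = pvRunLen (m2 :: rest2) m2
      rw [pvGetDErase _ mx m2 hsecne, PySem.Dict.getD_counter, hrun2]
      have harrc : arr.count m2 = (m2 :: rest2).count m2 := by
        rw [← hperm.count_eq m2, List.count_cons]
        simp [Ne.symm hsecne]
      rw [harrc]
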